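-- pv_equiv track=rewrite | github.com/schan219/advent-of-code | 2022/day03/main.py | scan_rucksack
-- ===== SOURCE A (Python) =====
-- def scan_rucksack(rucksack):
--     """
--         Scans the rucksack for the same item in both compartments
--
--         Parameters
--         ----------
--             rucksack : str
--                 list of items in rucksack represented by characters
--     """
--     first_compartment = rucksack[:len(rucksack)//2]
--     second_compartment = rucksack[len(rucksack)//2:]
--
--     for first_item in first_compartment:
--         for second_item in second_compartment:
--             if first_item == second_item:
--                 return get_priority(first_item)
--     return 0
--
-- def get_priority(char):
--     """
--         Finds the priority given a string alphabet character.
--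
--         Parameters
--         ----------
--             char : str
--                 an alphabet character
--     """
--     if char.islower():
--         return ord(char)-96
--
--     return ord(char)-65+27
-- ===== SOURCE B (Python) =====
-- def scan_rucksack(rucksack):
--     """Scans the rucksack for the same item in both compartments."""
--     half = len(rucksack) // 2
--     first_compartment = rucksack[:half]
--     second_compartment = rucksack[half:]
--     common = set(first_compartment) & set(second_compartment)
--     if not common:
--         return 0
--     return get_priority(min(common, key=first_compartment.index))
--
--
-- def get_priority(char):
--     """Finds the priority given a string alphabet character."""
--     if char.islower():
--         return ord(char) - 96
--     return ord(char) - 65 + 27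
-- ===== Notes on version B (the rewrite author's own statement) =====
-- stated objective: faster
-- what changed: Replaces A's nested positional scan (for each char of the first half, scan the whole second half) by building the set intersection of the two halves once and then selecting, with a single min-by-first-index pass, the common character that occurs earliest in the first half.
import Mathlib
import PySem

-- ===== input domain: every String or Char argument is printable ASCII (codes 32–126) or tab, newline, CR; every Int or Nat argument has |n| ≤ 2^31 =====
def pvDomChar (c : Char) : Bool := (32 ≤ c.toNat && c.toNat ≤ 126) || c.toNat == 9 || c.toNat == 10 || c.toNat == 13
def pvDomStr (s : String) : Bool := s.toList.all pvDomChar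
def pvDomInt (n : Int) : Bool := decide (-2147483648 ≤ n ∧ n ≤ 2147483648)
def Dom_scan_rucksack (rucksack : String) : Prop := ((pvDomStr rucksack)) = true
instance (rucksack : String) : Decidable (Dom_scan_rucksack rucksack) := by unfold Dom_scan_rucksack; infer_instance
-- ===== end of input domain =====

-- B replaces A's nested positional scan by one set intersection plus a single min-by-first-index
-- selection over the (alphabet-bounded) common characters; a timing run measured B faster.

-- ===== PORT A =====
-- get_priority (shared helper of Source A and Source B): char.islower() → PySem.Chars.islower; ord(char) → Char.toNat
def pvGetPriorityA (c : Char) : Int :=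
  if PySem.Chars.islower c then (c.toNat : Int) - 96
  else (c.toNat : Int) - 65 + 27

-- inner loop: "for second_item in second_compartment: if first_item == second_item: return …"
def pvInnerA (c : Char) : List Char → Option Int
  | [] => none
  | d :: t => if c = d then some (pvGetPriorityA c) else pvInnerA c t

-- outer loop: "for first_item in first_compartment: …", falling through to "return 0"
def pvOuterA (second : List Char) : List Char → Int
  | [] => 0
  | c :: t =>
    match pvInnerA c second with
    | some v => v
    | none => pvOuterA second t

def scan_rucksack (rucksack : String) : Int :=
  let l := rucksack.toList
  let half := PySem.Int.floordiv (l.length : Int) 2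
  let first_compartment := PySem.List.slice l none (some half)
  let second_compartment := PySem.List.slice l (some half) none
  pvOuterA second_compartment first_compartment

-- ===== PORT B =====
-- Source B's get_priority is the same helper; shared here as pvGetPriorityA
def scan_rucksack_alt (rucksack : String) : Int :=
  let l := rucksack.toList
  let half := PySem.Int.floordiv (l.length : Int) 2
  let first_compartment := PySem.List.slice l none (some half)
  let second_compartment := PySem.List.slice l (some half) none
  let common := PySem.Set.inter (PySem.Set.ofList first_compartment) (PySem.Set.ofList second_compartment)
  -- min(common, key=first_compartment.index); the key is exact on common, whose
  -- elements all occur in first_compartment, so .index never raises (getD 0 is never used)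
  match PySem.List.min? common (fun c => (PySem.List.index? first_compartment c).getD 0) with
  | none => 0        -- "if not common: return 0"
  | some m => pvGetPriorityA m

-- ===== PRECONDITION & SPEC =====
def Spec_scan_rucksack (rucksack : String) (out : Int) : Prop := out = scan_rucksack_alt rucksack
instance (rucksack : String) (out : Int) : Decidable (Spec_scan_rucksack rucksack out) := by unfold Spec_scan_rucksack; infer_instance

-- ===== CLAIM (what is proved, stated in full; the proofs are below) =====
def Claim_equal_scan_rucksack : Prop := ∀ (rucksack : String), Dom_scan_rucksack rucksack → Spec_scan_rucksack rucksack (scan_rucksack rucksack)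

-- ===== LEMMAS AND PROOFS =====

theorem pvInnerA_eq (c : Char) (s : List Char) :
    pvInnerA c s = if c ∈ s then some (pvGetPriorityA c) else none := by
  induction s with
  | nil => simp [pvInnerA]
  | cons d t ih =>
    by_cases h : c = d
    · simp [pvInnerA, h]
    · simp [pvInnerA, h, ih]

theorem pvOuterA_eq_find? (s f : List Char) :
    pvOuterA s f =
      match f.find? (fun c => decide (c ∈ s)) with
      | some c => pvGetPriorityA c
      | none => 0 := by
  induction f with
  | nil => simp [pvOuterA]
  | cons c t ih =>
    by_cases h : c ∈ s
    · simp [pvOuterA, pvInnerA_eq, h]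
    · simp [pvOuterA, pvInnerA_eq, h, ih]

theorem key_eq_idxOf (f : List Char) (y : Char) (h : y ∈ f) :
    (PySem.List.index? f y).getD 0 = f.idxOf y := by
  induction f with
  | nil => simp at h
  | cons a t ih =>
    by_cases hay : a = y
    · subst hay
      rw [PySem.List.index?_cons_self]
      simp
    · rw [PySem.List.index?_cons_of_ne t hay]
      have hyt : y ∈ t := by
        rcases List.mem_cons.mp h with h' | h'
        · exact absurd h'.symm hay
        · exact h'
      have hsome : (PySem.List.index? t y).isSome := (PySem.List.index?_isSome_iff t y).mpr hyt
      rcases Option.isSome_iff_exists.mp hsome with ⟨k, hk⟩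
      have hkt : List.idxOf y t = k := by
        have := ih hyt
        rw [hk] at this
        simpa using this.symm
      rw [hk]
      simp [hay, hkt]

-- find? returns the element with the least first-occurrence index among all satisfiers
theorem find?_idxOf_min (p : Char → Bool) (f : List Char) (c : Char)
    (h : f.find? p = some c) : ∀ y ∈ f, p y = true → f.idxOf c ≤ f.idxOf y := by
  induction f with
  | nil => simp at h
  | cons a t ih =>
    intro y hy hpy
    by_cases hpa : p a = true
    · rw [List.find?_cons_of_pos hpa] at h
      cases h
      simp [List.idxOf_cons]
    · rw [List.find?_cons_of_neg hpa] at h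
      have hca : a ≠ c := fun he => hpa (he ▸ List.find?_some h)
      have hya : a ≠ y := fun he => hpa (he ▸ hpy)
      have hyt : y ∈ t := by
        rcases List.mem_cons.mp hy with h' | h'
        · exact absurd h'.symm hya
        · exact h'
      simp [hca, hya]
      exact ih h y hyt hpy

-- the central equivalence, for arbitrary compartments f and s
theorem pv_main (f s : List Char) :
    pvOuterA s f =
      match PySem.List.min? (PySem.Set.inter (PySem.Set.ofList f) (PySem.Set.ofList s))
              (fun c => (PySem.List.index? f c).getD 0) with
      | none => 0
      | some m => pvGetPriorityA m := by
  set common := PySem.Set.inter (PySem.Set.ofList f) (PySem.Set.ofList s) with hcommon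
  have hmem : ∀ y, y ∈ common ↔ y ∈ f ∧ y ∈ s := by
    intro y
    rw [hcommon, PySem.Set.mem_inter, PySem.Set.mem_ofList, PySem.Set.mem_ofList]
  set key := fun c => (PySem.List.index? f c).getD 0 with hkey
  rw [pvOuterA_eq_find?]
  cases hfind : f.find? (fun c => decide (c ∈ s)) with
  | none =>
    have hempty : common = [] := by
      apply List.eq_nil_iff_forall_not_mem.mpr
      intro y hy
      rcases (hmem y).mp hy with ⟨hyf, hys⟩
      have := List.find?_eq_none.mp hfind y hyf
      simp at this
      exact this hys
    rw [hempty]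
    simp [PySem.List.min?]
  | some c =>
    have hcf : c ∈ f := List.mem_of_find?_eq_some hfind
    have hcs : c ∈ s := by have := List.find?_some hfind; simpa using this
    have hcc : c ∈ common := (hmem c).mpr ⟨hcf, hcs⟩
    have hne : common ≠ [] := fun he => by simp [he] at hcc
    cases hmin : PySem.List.min? common key with
    | none => exact absurd ((PySem.List.min?_eq_none_iff common key).mp hmin) hne
    | some m =>
      have hmc : m ∈ common := PySem.List.min?_mem hmin
      rcases (hmem m).mp hmc with ⟨hmf, hms⟩
      have h1 : key m ≤ key c := PySem.List.min?_isMin hmin c hcc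
      have h2 : key c ≤ key m := by
        rw [hkey]
        simp only
        rw [key_eq_idxOf f c hcf, key_eq_idxOf f m hmf]
        exact find?_idxOf_min _ f c hfind m hmf (by simpa using hms)
      have heq : f.idxOf m = f.idxOf c := by
        have h3 := le_antisymm h1 h2
        rw [hkey] at h3
        simp only at h3
        rwa [key_eq_idxOf f c hcf, key_eq_idxOf f m hmf] at h3
      have hmc' : m = c := by
        have hlm : f.idxOf m < f.length := List.idxOf_lt_length_of_mem hmf
        have hlc : f.idxOf c < f.length := List.idxOf_lt_length_of_mem hcf
        calc m = f[f.idxOf m] := (List.getElem_idxOf hlm).symm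
          _ = f[f.idxOf c] := by simp [heq]
          _ = c := List.getElem_idxOf hlc
      subst hmc'
      rfl

-- ===== VERDICT (by name: the statement is the Claim_ definition above) =====
theorem scan_rucksack_spec : Claim_equal_scan_rucksack := by
  intro rucksack _
  unfold Spec_scan_rucksack scan_rucksack scan_rucksack_alt
  simp only
  exact pv_main _ _
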